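-- pv_equiv track=rewrite | github.com/sm113/news_bench | app.py | group_sources_by_lean
-- ===== SOURCE A (Python) =====
-- def group_sources_by_lean(sources: list) -> dict:
--     """Group source articles by political lean."""
--     grouped = {
--         'left': [],
--         'center': [],
--         'right': [],
--         'international': []
--     }
--     for source in sources:
--         lean = source.get('source_lean', 'center')
--         if lean in grouped:
--             grouped[lean].append(source)
--         else:
--             grouped['center'].append(source)
--     return grouped
-- ===== SOURCE B (Python) =====
-- BUCKETS = ('left', 'center', 'right', 'international')
--
--
-- def _bucket(source):
--     """Classify one source: its lean if it is a known bucket, else 'center'."""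
--     lean = source.get('source_lean', 'center')
--     return lean if lean in BUCKETS else 'center'
--
--
-- def group_sources_by_lean(sources: list) -> dict:
--     """Group source articles by political lean (one filtering scan per bucket)."""
--     return {k: [s for s in sources if _bucket(s) == k] for k in BUCKETS}
-- ===== Notes on version B (the rewrite author's own statement) =====
-- stated objective: alternative
-- what changed: Replaces the single append-to-bucket pass over a pre-seeded dict by a per-source classifier plus one independent filtering scan of the sources per bucket (dict comprehension over the four bucket names).
import Mathlib
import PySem

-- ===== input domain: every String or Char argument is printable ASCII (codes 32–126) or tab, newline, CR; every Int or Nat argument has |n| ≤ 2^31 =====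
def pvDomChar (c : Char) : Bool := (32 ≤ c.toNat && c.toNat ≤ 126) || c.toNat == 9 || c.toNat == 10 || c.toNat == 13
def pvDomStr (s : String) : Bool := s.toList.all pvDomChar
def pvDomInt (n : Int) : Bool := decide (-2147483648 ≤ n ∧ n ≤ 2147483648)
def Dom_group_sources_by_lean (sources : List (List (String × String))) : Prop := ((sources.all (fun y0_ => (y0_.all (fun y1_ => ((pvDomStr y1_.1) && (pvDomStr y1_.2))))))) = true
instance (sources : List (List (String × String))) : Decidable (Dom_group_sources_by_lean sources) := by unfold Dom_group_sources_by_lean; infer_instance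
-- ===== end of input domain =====

-- B builds each bucket independently by one filtering scan per bucket (using a per-source
-- classifier) instead of A's single pass appending each source into a pre-seeded dict.

-- ===== PORT A =====
def group_sources_by_lean (sources : List (List (String × String))) : List (String × List (List (String × String))) :=
  let grouped : PySem.Dict String (List (List (String × String))) :=
    PySem.Dict.ofList [("left", []), ("center", []), ("right", []), ("international", [])]
  (sources.foldl (fun g source =>
      let lean := (PySem.Dict.mk source).getD "source_lean" "center"
      if g.contains lean then g.modify lean [] (fun l => l ++ [source])
      else g.modify "center" [] (fun l => l ++ [source])) grouped).items

-- ===== PORT B =====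
-- classifier: the source's lean if it is one of the four bucket names, else "center"
def gsblBucket (source : List (String × String)) : String :=
  let lean := (PySem.Dict.mk source).getD "source_lean" "center"
  if lean ∈ ["left", "center", "right", "international"] then lean else "center"

def group_sources_by_lean_alt (sources : List (List (String × String))) : List (String × List (List (String × String))) :=
  ["left", "center", "right", "international"].map
    (fun k => (k, sources.filter (fun s => gsblBucket s == k)))

-- ===== PRECONDITION & SPEC =====
def Spec_group_sources_by_lean (sources : List (List (String × String))) (out : List (String × List (List (String × String)))) : Prop := out = group_sources_by_lean_alt sources
instance (sources : List (List (String × String))) (out : List (String × List (List (String × String)))) : Decidable (Spec_group_sources_by_lean sources out) := by unfold Spec_group_sources_by_lean; infer_instance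

-- ===== CLAIM (what is proved, stated in full; the proofs are below) =====
def Claim_equal_group_sources_by_lean : Prop := ∀ (sources : List (List (String × String))), Dom_group_sources_by_lean sources → Spec_group_sources_by_lean sources (group_sources_by_lean sources)

-- ===== LEMMAS AND PROOFS =====

-- the loop step of A
def gsblStep (g : PySem.Dict String (List (List (String × String)))) (source : List (String × String)) :
    PySem.Dict String (List (List (String × String))) :=
  if g.contains ((PySem.Dict.mk source).getD "source_lean" "center") then
    g.modify ((PySem.Dict.mk source).getD "source_lean" "center") [] (fun l => l ++ [source])
  else g.modify "center" [] (fun l => l ++ [source])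

lemma gsbl_keys_step (g : PySem.Dict String (List (List (String × String)))) (s : List (String × String))
    (h : g.keys = ["left", "center", "right", "international"]) :
    (gsblStep g s).keys = ["left", "center", "right", "international"] := by
  unfold gsblStep
  by_cases hc : g.contains ((PySem.Dict.mk s).getD "source_lean" "center") = true
  · rw [if_pos hc, PySem.Dict.keys_modify, PySem.Dict.keys_insert_of_contains _ _ hc, h]
  · have hcen : g.contains "center" = true := by
      rw [PySem.Dict.contains_eq_decide_mem_keys, h]; decide
    rw [if_neg hc, PySem.Dict.keys_modify, PySem.Dict.keys_insert_of_contains _ _ hcen, h]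

lemma gsbl_getD_step (g : PySem.Dict String (List (List (String × String)))) (s : List (String × String))
    (h : g.keys = ["left", "center", "right", "international"]) (k : String) :
    (gsblStep g s).getD k [] = g.getD k [] ++ (if gsblBucket s = k then [s] else []) := by
  unfold gsblStep
  have hbucket : gsblBucket s = (if (PySem.Dict.mk s).getD "source_lean" "center" ∈ ["left", "center", "right", "international"] then (PySem.Dict.mk s).getD "source_lean" "center" else "center") := rfl
  rw [hbucket]
  have hmem : g.contains ((PySem.Dict.mk s).getD "source_lean" "center") = true ↔
      (PySem.Dict.mk s).getD "source_lean" "center" ∈ ["left", "center", "right", "international"] := by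
    rw [PySem.Dict.contains_eq_decide_mem_keys, h]; simp
  by_cases hc : g.contains ((PySem.Dict.mk s).getD "source_lean" "center") = true
  · have hl := hmem.mp hc
    rw [if_pos hc, PySem.Dict.getD_modify, if_pos hl]
    by_cases hk : k = (PySem.Dict.mk s).getD "source_lean" "center"
    · rw [if_pos hk, if_pos hk.symm, hk]
    · rw [if_neg hk, if_neg (fun hh => hk hh.symm), List.append_nil]
  · have hl : ¬ (PySem.Dict.mk s).getD "source_lean" "center" ∈ ["left", "center", "right", "international"] :=
      fun hm => hc (hmem.mpr hm)
    rw [if_neg hc, PySem.Dict.getD_modify, if_neg hl]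
    by_cases hk : k = "center"
    · rw [if_pos hk, if_pos hk.symm, hk]
    · rw [if_neg hk, if_neg (fun hh => hk hh.symm), List.append_nil]

lemma gsbl_fold_keys (ss : List (List (String × String))) (g : PySem.Dict String (List (List (String × String))))
    (h : g.keys = ["left", "center", "right", "international"]) :
    (ss.foldl gsblStep g).keys = ["left", "center", "right", "international"] := by
  induction ss generalizing g with
  | nil => exact h
  | cons s ss ih => exact ih _ (gsbl_keys_step g s h)

lemma gsbl_fold_getD (ss : List (List (String × String))) (g : PySem.Dict String (List (List (String × String))))
    (h : g.keys = ["left", "center", "right", "international"]) (k : String) :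
    (ss.foldl gsblStep g).getD k [] = g.getD k [] ++ ss.filter (fun s => gsblBucket s == k) := by
  induction ss generalizing g with
  | nil => simp
  | cons s ss ih =>
    rw [List.foldl_cons, ih _ (gsbl_keys_step g s h), gsbl_getD_step g s h k,
      List.filter_cons]
    by_cases hb : gsblBucket s = k <;> simp [hb]

-- ===== VERDICT (by name: the statement is the Claim_ definition above) =====
theorem group_sources_by_lean_spec : Claim_equal_group_sources_by_lean := by
  intro sources _
  unfold Spec_group_sources_by_lean group_sources_by_lean group_sources_by_lean_alt
  have hinit : (PySem.Dict.ofList (κ := String) (ν := List (List (String × String)))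
      [("left", []), ("center", []), ("right", []), ("international", [])]).keys
      = ["left", "center", "right", "international"] := by decide
  have hkeys := gsbl_fold_keys sources _ hinit
  have hitems := PySem.Dict.items_eq_map_keys (sources.foldl gsblStep _)
    (by rw [hkeys]; decide) []
  show (sources.foldl gsblStep _).items = _
  rw [hitems, hkeys]
  simp only [List.map_cons, List.map_nil]
  have hg := gsbl_fold_getD sources _ hinit
  have e1 : (PySem.Dict.ofList (κ := String) (ν := List (List (String × String)))
      [("left", []), ("center", []), ("right", []), ("international", [])]).getD "left" [] = [] := rfl
  have e2 : (PySem.Dict.ofList (κ := String) (ν := List (List (String × String)))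
      [("left", []), ("center", []), ("right", []), ("international", [])]).getD "center" [] = [] := rfl
  have e3 : (PySem.Dict.ofList (κ := String) (ν := List (List (String × String)))
      [("left", []), ("center", []), ("right", []), ("international", [])]).getD "right" [] = [] := rfl
  have e4 : (PySem.Dict.ofList (κ := String) (ν := List (List (String × String)))
      [("left", []), ("center", []), ("right", []), ("international", [])]).getD "international" [] = [] := rfl
  rw [hg "left", hg "center", hg "right", hg "international", e1, e2, e3, e4]
  simp
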